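-- pv_equiv track=rewrite | github.com/AhmedTarek62/wavesfm | run_finetune_all.py | _pick_best_entry
-- ===== SOURCE A (Python) =====
-- def _pick_best_entry(entries: list[dict]) -> dict | None:
--     best_entry = None
--     last_best = None
--     for entry in entries:
--         cur = entry.get("best_metric")
--         if cur is None:
--             continue
--         if last_best is None or cur != last_best:
--             last_best = cur
--             best_entry = entry
--     return best_entry
-- ===== SOURCE B (Python) =====
-- def _pick_best_entry(entries: list[dict]) -> dict | None:
--     # Scan backwards: extend through the final run of equal metrics, stop at the
--     # first metric change.  Returns the first entry of the last run, like A.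
--     best = None
--     for entry in reversed(entries):
--         cur = entry.get("best_metric")
--         if cur is None:
--             continue
--         if best is not None and cur != best.get("best_metric"):
--             break
--         best = entry
--     return best
-- ===== Notes on version B (the rewrite author's own statement) =====
-- stated objective: alternative
-- what changed: B scans the entries back-to-front, walking backwards through the final run of equal best_metric values and breaking at the first metric change, instead of A's forward full scan that replaces its retained entry whenever the metric differs from the last retained one.
import Mathlib
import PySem

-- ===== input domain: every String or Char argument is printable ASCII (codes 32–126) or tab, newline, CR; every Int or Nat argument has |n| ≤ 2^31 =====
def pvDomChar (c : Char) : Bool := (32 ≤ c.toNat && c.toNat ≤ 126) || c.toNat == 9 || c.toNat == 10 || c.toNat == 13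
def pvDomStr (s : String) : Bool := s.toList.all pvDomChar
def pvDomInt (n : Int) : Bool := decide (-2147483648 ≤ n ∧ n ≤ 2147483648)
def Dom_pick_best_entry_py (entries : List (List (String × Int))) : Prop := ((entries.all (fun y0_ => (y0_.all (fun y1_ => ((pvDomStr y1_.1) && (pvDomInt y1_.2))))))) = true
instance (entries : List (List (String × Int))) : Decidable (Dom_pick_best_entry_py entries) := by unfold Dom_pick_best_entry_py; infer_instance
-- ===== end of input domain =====

-- B change (one honest line): B scans the entries back-to-front, stopping after the final
-- run of equal best_metric values, instead of A's forward scan with replace-on-change state.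

-- ===== PORT A =====
-- Python A: forward loop keeping (best_entry, last_best); entry.get("best_metric") is a dict lookup.
def pick_best_entry_py (entries : List (List (String × Int))) : Option (List (String × Int)) :=
  (entries.foldl
    (fun st entry =>
      match (PySem.Dict.mk entry).get? "best_metric" with
      | none => st
      | some cur =>
        if st.2 = none ∨ some cur ≠ st.2 then (some entry, some cur) else st)
    ((none, none) : Option (List (String × Int)) × Option Int)).1

-- ===== PORT B =====
-- backward loop of Source B: `continue` on missing metric, `break` on a metric change, else best := entry
def pickRevGo (best : Option (List (String × Int))) :
    List (List (String × Int)) → Option (List (String × Int))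
  | [] => best
  | entry :: rest =>
    match (PySem.Dict.mk entry).get? "best_metric" with
    | none => pickRevGo best rest
    | some cur =>
      match best with
      | some b =>
        if some cur ≠ (PySem.Dict.mk b).get? "best_metric" then best
        else pickRevGo (some entry) rest
      | none => pickRevGo (some entry) rest

def pick_best_entry_py_alt (entries : List (List (String × Int))) : Option (List (String × Int)) :=
  pickRevGo none entries.reverse

-- ===== PRECONDITION & SPEC =====
def Spec_pick_best_entry_py (entries : List (List (String × Int))) (out : Option (List (String × Int))) : Prop := out = pick_best_entry_py_alt entries
instance (entries : List (List (String × Int))) (out : Option (List (String × Int))) : Decidable (Spec_pick_best_entry_py entries out) := by unfold Spec_pick_best_entry_py; infer_instance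

-- ===== CLAIM (what is proved, stated in full; the proofs are below) =====
def Claim_equal_pick_best_entry_py : Prop := ∀ (entries : List (List (String × Int))), Dom_pick_best_entry_py entries → Spec_pick_best_entry_py entries (pick_best_entry_py entries)

-- ===== LEMMAS AND PROOFS =====
-- abbreviations for the proofs (not used by the claim block)
def pvMet (e : List (String × Int)) : Option Int := (PySem.Dict.mk e).get? "best_metric"

def pvStepA (st : Option (List (String × Int)) × Option Int) (entry : List (String × Int)) :
    Option (List (String × Int)) × Option Int :=
  match (PySem.Dict.mk entry).get? "best_metric" with
  | none => st
  | some cur => if st.2 = none ∨ some cur ≠ st.2 then (some entry, some cur) else st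

-- the joint invariant relating A's forward fold state to B's backward scan
def pvInv (l : List (List (String × Int))) : Prop :=
  (l.foldl pvStepA (none, none) = (none, none) →
    (pickRevGo none l.reverse = none ∧ ∀ e, pickRevGo (some e) l.reverse = some e))
  ∧ (∀ p c, l.foldl pvStepA (none, none) = (some p, some c) →
      pvMet p = some c ∧ pickRevGo none l.reverse = some p ∧
      ∀ e m, pvMet e = some m →
        pickRevGo (some e) l.reverse = (if m = c then some p else some e))
  ∧ ((∃ p c, l.foldl pvStepA (none, none) = (some p, some c))
      ∨ l.foldl pvStepA (none, none) = (none, none))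

theorem pvInv_all (l : List (List (String × Int))) : pvInv l := by
  induction l using List.reverseRecOn with
  | nil =>
    refine ⟨fun _ => ⟨rfl, fun e => rfl⟩, fun p c h => by simp at h, Or.inr rfl⟩
  | append_singleton l e ih =>
    obtain ⟨ih0, ih1, ih2⟩ := ih
    have hfold : (l ++ [e]).foldl pvStepA (none, none)
        = pvStepA (l.foldl pvStepA (none, none)) e := by
      rw [List.foldl_append]; rfl
    have hrev : (l ++ [e]).reverse = e :: l.reverse := by simp
    rcases hme : (PySem.Dict.mk e).get? "best_metric" with _ | m
    · -- e has no metric: both sides skip it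
      have hstep : pvStepA (l.foldl pvStepA (none, none)) e = l.foldl pvStepA (none, none) := by
        simp [pvStepA, hme]
      have hpick : ∀ b, pickRevGo b ((l ++ [e]).reverse) = pickRevGo b l.reverse := by
        intro b; rw [hrev]; simp [pickRevGo, hme]
      refine ⟨?_, ?_, ?_⟩
      · intro h
        rw [hfold, hstep] at h
        exact ⟨by rw [hpick]; exact (ih0 h).1, fun e' => by rw [hpick]; exact (ih0 h).2 e'⟩
      · intro p c h
        rw [hfold, hstep] at h
        obtain ⟨h1, h2, h3⟩ := ih1 p c h
        exact ⟨h1, by rw [hpick]; exact h2, fun e' m' hm' => by rw [hpick]; exact h3 e' m' hm'⟩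
      · rw [hfold, hstep]; exact ih2
    · -- e has metric m
      rcases ih2 with ⟨p, c, hl⟩ | hl
      · obtain ⟨hpc, hnone, hsome⟩ := ih1 p c hl
        by_cases hmc : m = c
        · -- same metric as the last run: A keeps (p, c)
          have hstep : (l ++ [e]).foldl pvStepA (none, none) = (some p, some c) := by
            rw [hfold, hl]; subst hmc; simp [pvStepA, hme]
          refine ⟨fun h => by rw [hstep] at h; exact absurd h (by simp), ?_, Or.inl ⟨p, c, hstep⟩⟩
          intro p' c' h
          rw [hstep] at h
          obtain ⟨hp, hc⟩ : some p = some p' ∧ some c = some c' := by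
            constructor <;> [exact congrArg Prod.fst h; exact congrArg Prod.snd h]
          cases hp; cases hc
          refine ⟨hpc, ?_, ?_⟩
          · rw [hrev]; simp only [pickRevGo, hme]
            rw [hsome e m hme]; simp [hmc]
          · intro e' m' hm'
            rw [hrev]; simp only [pickRevGo, hme]
            unfold pvMet at hm'; rw [hm']
            by_cases h' : m' = c
            · have hmm : m = m' := by rw [hmc, h']
              rw [if_neg (by simp [hmm]), hsome e m hme, if_pos hmc, if_pos h']
            · have hne : m ≠ m' := fun hh => h' (hh ▸ hmc)
              simp [hne, h']
        · -- metric change: A replaces with (e, m)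
          have hstep : (l ++ [e]).foldl pvStepA (none, none) = (some e, some m) := by
            rw [hfold, hl]; simp [pvStepA, hme, hmc]
          refine ⟨fun h => by rw [hstep] at h; exact absurd h (by simp), ?_, Or.inl ⟨e, m, hstep⟩⟩
          intro p' c' h
          rw [hstep] at h
          obtain ⟨hp, hc⟩ : some e = some p' ∧ some m = some c' := by
            constructor <;> [exact congrArg Prod.fst h; exact congrArg Prod.snd h]
          cases hp; cases hc
          refine ⟨hme, ?_, ?_⟩
          · rw [hrev]; simp only [pickRevGo, hme]
            rw [hsome e m hme]; simp [hmc]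
          · intro e' m' hm'
            rw [hrev]; simp only [pickRevGo, hme]
            unfold pvMet at hm'; rw [hm']
            by_cases h' : m' = m
            · subst h'
              simp only [ne_eq, Option.some.injEq, not_true_eq_false, reduceIte, if_pos rfl]
              rw [hsome e m' hme]; simp [hmc]
            · have : m ≠ m' := Ne.symm h'
              simp [this, h']
      · -- no entry retained yet: A takes (e, m)
        have hstep : (l ++ [e]).foldl pvStepA (none, none) = (some e, some m) := by
          rw [hfold, hl]; simp [pvStepA, hme]
        refine ⟨fun h => by rw [hstep] at h; exact absurd h (by simp), ?_, Or.inl ⟨e, m, hstep⟩⟩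
        intro p' c' h
        rw [hstep] at h
        obtain ⟨hp, hc⟩ : some e = some p' ∧ some m = some c' := by
          constructor <;> [exact congrArg Prod.fst h; exact congrArg Prod.snd h]
        cases hp; cases hc
        refine ⟨hme, ?_, ?_⟩
        · rw [hrev]; simp only [pickRevGo, hme]
          exact (ih0 hl).2 e
        · intro e' m' hm'
          rw [hrev]; simp only [pickRevGo, hme]
          unfold pvMet at hm'; rw [hm']
          by_cases h' : m' = m
          · subst h'
            simp only [ne_eq, Option.some.injEq, not_true_eq_false, reduceIte, if_pos rfl]
            exact (ih0 hl).2 e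
          · simp [Ne.symm h', h']

theorem pvA_eq_fold (entries : List (List (String × Int))) :
    pick_best_entry_py entries = (entries.foldl pvStepA (none, none)).1 := rfl


-- ===== VERDICT (by name: the statement is the Claim_ definition above) =====
theorem pick_best_entry_py_spec : Claim_equal_pick_best_entry_py := by
  intro entries _
  unfold Spec_pick_best_entry_py pick_best_entry_py_alt
  obtain ⟨h0, h1, h2⟩ := pvInv_all entries
  rw [pvA_eq_fold]
  rcases h2 with ⟨p, c, h⟩ | h
  · rw [h, (h1 p c h).2.1]
  · rw [h, (h0 h).1]
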